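-- pv_equiv track=rewrite | github.com/yqkcn/leetcode | create-maximum-number.py | get_max_sequence
-- ===== SOURCE A (Python) =====
-- def get_max_sequence(nums, k):
--     """取出k个元素组成最大值"""
--     stack = []
--     target = len(nums) - k  # 删除个数
--
--     for num in nums:
--         while stack and target and num > stack[-1]:
--             stack.pop()
--             target -= 1
--         stack.append(num)
--     if target > 0:
--         stack = stack[:-target]
--     return stack
-- ===== SOURCE B (Python) =====
-- def get_max_sequence(nums, k):
--     """取出k个元素组成最大值"""
--     n = len(nums)
--     res = []
--     start = 0
--     for i in range(k):
--         bound = n - k + i + 1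
--         window = nums[start:bound]
--         m = max(window)
--         j = window.index(m)
--         res.append(m)
--         start = start + j + 1
--     return res
-- ===== Notes on version B (the rewrite author's own statement) =====
-- stated objective: alternative
-- what changed: Replaced the single monotonic-stack push/pop pass (delete-counter trim) by the classic windowed greedy: k rounds, each finding the first maximum in nums[start : n-k+i+1], appending it and moving start past it.
-- outside the precondition, e.g. on get_max_sequence([1, 2], 3): A returns [2], B raises ValueError
import Mathlib
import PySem

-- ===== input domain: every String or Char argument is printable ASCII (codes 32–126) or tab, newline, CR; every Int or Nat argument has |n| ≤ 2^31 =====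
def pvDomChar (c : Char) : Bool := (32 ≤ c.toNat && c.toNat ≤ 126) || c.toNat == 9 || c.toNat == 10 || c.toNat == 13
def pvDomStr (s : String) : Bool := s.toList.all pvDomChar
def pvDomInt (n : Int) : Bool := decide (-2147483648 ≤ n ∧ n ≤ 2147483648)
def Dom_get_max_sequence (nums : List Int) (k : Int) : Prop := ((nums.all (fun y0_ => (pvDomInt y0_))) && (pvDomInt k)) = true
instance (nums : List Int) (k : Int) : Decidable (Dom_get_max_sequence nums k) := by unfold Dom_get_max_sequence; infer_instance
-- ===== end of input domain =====

-- B replaces A's single monotonic-stack pass by the classic windowed greedy (k first-maximum window scans); equal return values for every k <= len(nums).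


-- ===== PORT A =====
-- the inner 'while stack and target and num > stack[-1]: stack.pop(); target -= 1' loop
def pvPopA (stack : List Int) (target : Int) (num : Int) : List Int × Int :=
  if h : stack ≠ [] ∧ target ≠ 0 ∧ num > stack.getLastD 0 then
    pvPopA stack.dropLast (target - 1) num
  else (stack, target)
termination_by stack.length
decreasing_by
  have hlen : 0 < stack.length := List.length_pos_iff.mpr h.1
  simp [List.length_dropLast]; omega

def get_max_sequence (nums : List Int) (k : Int) : List Int :=
  let p := nums.foldl (fun (s : List Int × Int) num =>
      ((pvPopA s.1 s.2 num).1 ++ [num], (pvPopA s.1 s.2 num).2)) ([], (nums.length : Int) - k)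
  if p.2 > 0 then PySem.List.slice p.1 none (some (-p.2)) else p.1

-- ===== PORT B =====
-- one iteration of B's 'for i in range(k)' loop (state = (res, start));
-- the 'none' branches are where Python's max() would raise (empty window: outside Pre_)
def pvStepB (nums : List Int) (k : Int) (s : List Int × Int) (i : Int) : List Int × Int :=
  let bound := (nums.length : Int) - k + i + 1
  let window := PySem.List.slice nums (some s.2) (some bound)
  match PySem.List.max? window (fun x => x) with
  | none => s
  | some m =>
    match PySem.List.index? window m with
    | none => s
    | some j => (s.1 ++ [m], s.2 + (j : Int) + 1)

def get_max_sequence_alt (nums : List Int) (k : Int) : List Int :=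
  ((PySem.List.pyRange 0 k 1).foldl (pvStepB nums k) ([], 0)).1

-- ===== PRECONDITION & SPEC =====
-- Pre_ excludes k > len(nums): there A's truthiness-based delete counter silently returns fewer
-- than k elements, while B's window is empty and its max() raises ValueError.
def Pre_get_max_sequence (nums : List Int) (k : Int) : Prop := k ≤ (nums.length : Int)
instance (nums : List Int) (k : Int) : Decidable (Pre_get_max_sequence nums k) := by
  unfold Pre_get_max_sequence; infer_instance

def pvWitness_get_max_sequence : List Int × Int := ([3, 1, 4, 2], 2)

def Spec_get_max_sequence (nums : List Int) (k : Int) (out : List Int) : Prop :=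
  out = get_max_sequence_alt nums k
instance (nums : List Int) (k : Int) (out : List Int) : Decidable (Spec_get_max_sequence nums k out) := by
  unfold Spec_get_max_sequence; infer_instance

-- ===== CLAIM (what is proved, stated in full; the proofs are below) =====
def Claim_equal_get_max_sequence : Prop := ∀ (nums : List Int) (k : Int),
  Dom_get_max_sequence nums k → Pre_get_max_sequence nums k →
  Spec_get_max_sequence nums k (get_max_sequence nums k)

-- ===== LEMMAS AND PROOFS =====

-- A's stack with its head at the TOP (reversed w.r.t. the Python list) --
def rpop : List Int → Int → Int → List Int × Int
  | [], t, _ => ([], t)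
  | y :: ys, t, x => if t ≠ 0 ∧ x > y then rpop ys (t - 1) x else (y :: ys, t)

def runA (s : List Int) (t : Int) (xs : List Int) : List Int × Int :=
  xs.foldl (fun st num => ((num :: (rpop st.1 st.2 num).1), (rpop st.1 st.2 num).2)) (s, t)

def pvTrim (p : List Int × Int) : List Int :=
  if 0 < p.2 then (p.1.drop p.2.toNat).reverse else p.1.reverse

-- the greedy recursion both programs compute --
def gms : List Int → Nat → List Int
  | _, 0 => []
  | nums, (r+1) =>
    let w := nums.take (nums.length - r)
    match PySem.List.max? w (fun x => x) with
    | none => []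
    | some m =>
      match PySem.List.index? w m with
      | none => []
      | some j => m :: gms (nums.drop (j+1)) r

lemma pvPopA_eq_rpop (s : List Int) (t x : Int) :
    pvPopA s t x = ((rpop s.reverse t x).1.reverse, (rpop s.reverse t x).2) := by
  induction s using List.reverseRecOn generalizing t with
  | nil => rw [pvPopA]; simp [rpop]
  | append_singleton ys y ih =>
    rw [pvPopA]
    by_cases hc : t ≠ 0 ∧ x > y
    · rw [dif_pos ⟨by simp, hc.1, by simpa [List.getLastD_concat] using hc.2⟩]
      rw [List.dropLast_concat, ih]
      simp [rpop, hc]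
    · rw [dif_neg (by
        intro h
        exact hc ⟨h.2.1, by simpa [List.getLastD_concat] using h.2.2⟩)]
      simp [rpop, hc]

lemma foldA_funext :
    (fun (st : List Int × Int) num => ((pvPopA st.1 st.2 num).1 ++ [num], (pvPopA st.1 st.2 num).2))
      = (fun (st : List Int × Int) num =>
          ((rpop st.1.reverse st.2 num).1.reverse ++ [num], (rpop st.1.reverse st.2 num).2)) := by
  funext st num
  rw [pvPopA_eq_rpop]

lemma runA_eq_foldl' (xs : List Int) : ∀ (s : List Int) (t : Int),
    xs.foldl (fun (st : List Int × Int) num =>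
        ((rpop st.1.reverse st.2 num).1.reverse ++ [num], (rpop st.1.reverse st.2 num).2)) (s, t)
      = ((runA s.reverse t xs).1.reverse, (runA s.reverse t xs).2) := by
  induction xs with
  | nil => intro s t; simp [runA]
  | cons x xs ih =>
    intro s t
    simp only [List.foldl_cons, runA] at ih ⊢
    have h := ih ((rpop s.reverse t x).1.reverse ++ [x]) ((rpop s.reverse t x).2)
    simp only [List.reverse_append, List.reverse_reverse, List.reverse_cons, List.reverse_nil,
      List.nil_append, List.singleton_append] at h
    simpa using h

lemma runA_eq_foldl (xs : List Int) (s : List Int) (t : Int) :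
    xs.foldl (fun (st : List Int × Int) num =>
        ((pvPopA st.1 st.2 num).1 ++ [num], (pvPopA st.1 st.2 num).2)) (s, t)
      = ((runA s.reverse t xs).1.reverse, (runA s.reverse t xs).2) := by
  rw [foldA_funext]
  exact runA_eq_foldl' xs s t

lemma reverse_take_sub (l : List Int) (n : Nat) :
    l.reverse.take (l.length - n) = (l.drop n).reverse := by
  rw [List.reverse_drop]

lemma get_max_sequence_char (nums : List Int) (k : Int) :
    get_max_sequence nums k = pvTrim (runA [] ((nums.length : Int) - k) nums) := by
  have h := runA_eq_foldl nums [] ((nums.length : Int) - k)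
  simp only [List.reverse_nil] at h
  simp only [get_max_sequence, h]
  unfold pvTrim
  by_cases h2 : 0 < (runA [] ((nums.length : Int) - k) nums).2
  · rw [if_pos h2, if_pos h2]
    have hneg : -(runA [] ((nums.length : Int) - k) nums).2
        = -(((runA [] ((nums.length : Int) - k) nums).2.toNat : Nat) : Int) := by omega
    rw [hneg, PySem.List.slice_to_neg_natCast _ _ (by omega)]
    rw [List.length_reverse, reverse_take_sub]
  · rw [if_neg h2, if_neg h2]

lemma rpop_len (s : List Int) (t x : Int) :
    ((rpop s t x).1.length : Int) - (rpop s t x).2 = (s.length : Int) - t := by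
  induction s generalizing t with
  | nil => simp [rpop]
  | cons y ys ih =>
    rw [rpop]
    split_ifs with h
    · have := ih (t - 1)
      simp only [List.length_cons]
      push_cast at *
      omega
    · simp

lemma rpop_nonneg (s : List Int) (t x : Int) (ht : 0 ≤ t) : 0 ≤ (rpop s t x).2 := by
  induction s generalizing t with
  | nil => simpa [rpop] using ht
  | cons y ys ih =>
    rw [rpop]
    split_ifs with h
    · exact ih (t - 1) (by omega)
    · simpa using ht

lemma rpop_mem (s : List Int) (t x : Int) : ∀ y ∈ (rpop s t x).1, y ∈ s := by
  induction s generalizing t with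
  | nil => simp [rpop]
  | cons y ys ih =>
    rw [rpop]
    split_ifs with h
    · intro z hz
      exact List.mem_cons_of_mem _ (ih (t - 1) z hz)
    · intro z hz; simpa using hz

lemma runA_len (xs : List Int) : ∀ (s : List Int) (t : Int),
    ((runA s t xs).1.length : Int) - (runA s t xs).2
      = (s.length : Int) - t + xs.length := by
  induction xs with
  | nil => intro s t; simp [runA]
  | cons x xs ih =>
    intro s t
    simp only [runA, List.foldl_cons]
    have h1 := ih (x :: (rpop s t x).1) ((rpop s t x).2)
    have h2 := rpop_len s t x
    simp only [runA] at h1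
    rw [h1]
    simp only [List.length_cons]
    push_cast at *
    omega

lemma runA_nonneg (xs : List Int) : ∀ (s : List Int) (t : Int), 0 ≤ t → 0 ≤ (runA s t xs).2 := by
  induction xs with
  | nil => intro s t ht; simpa [runA] using ht
  | cons x xs ih =>
    intro s t ht
    simp only [runA, List.foldl_cons]
    exact ih _ _ (rpop_nonneg s t x ht)

lemma runA_mem (xs : List Int) : ∀ (s : List Int) (t : Int),
    ∀ y ∈ (runA s t xs).1, y ∈ s ∨ y ∈ xs := by
  induction xs with
  | nil => intro s t y hy; left; simpa [runA] using hy
  | cons x xs ih =>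
    intro s t y hy
    simp only [runA, List.foldl_cons] at hy
    rcases ih (x :: (rpop s t x).1) ((rpop s t x).2) y hy with h | h
    · rcases List.mem_cons.mp h with h' | h'
      · right; simp [h']
      · left; exact rpop_mem s t x y h'
    · right; exact List.mem_cons_of_mem _ h

lemma rpop_all (s : List Int) (t x : Int) (hlt : ∀ y ∈ s, y < x)
    (hts : (s.length : Int) ≤ t) : rpop s t x = ([], t - s.length) := by
  induction s generalizing t with
  | nil => simp [rpop]
  | cons y ys ih =>
    have hne : t ≠ 0 := by
      simp only [List.length_cons] at hts
      push_cast at hts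
      omega
    rw [rpop, if_pos ⟨hne, hlt y (by simp)⟩]
    rw [ih (t - 1) (fun z hz => hlt z (List.mem_cons_of_mem _ hz)) (by
      simp only [List.length_cons] at hts
      push_cast at hts ⊢
      omega)]
    simp only [List.length_cons]
    congr 1
    push_cast
    ring

-- phase (a): processing the strictly-smaller prefix and then the window maximum
lemma runA_prefix (ys : List Int) (t0 m : Int) (hlt : ∀ y ∈ ys, y < m)
    (hy : (ys.length : Int) ≤ t0) :
    runA [] t0 (ys ++ [m]) = ([m], t0 - ys.length) := by
  have hsplit : runA [] t0 (ys ++ [m])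
      = (m :: (rpop (runA [] t0 ys).1 (runA [] t0 ys).2 m).1,
         (rpop (runA [] t0 ys).1 (runA [] t0 ys).2 m).2) := by
    simp [runA, List.foldl_append]
  have hmem : ∀ y ∈ (runA [] t0 ys).1, y < m := by
    intro y hy'
    rcases runA_mem ys [] t0 y hy' with h | h
    · simp at h
    · exact hlt y h
  have hlen := runA_len ys [] t0
  have hle : (((runA [] t0 ys).1.length : Int)) ≤ (runA [] t0 ys).2 := by
    simp at hlen; omega
  rw [hsplit, rpop_all _ _ _ hmem hle]
  simp at hlen ⊢
  omega

lemma rpop_bottom (s : List Int) (t x m : Int) (ht : 0 ≤ t)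
    (hcond : x ≤ m ∨ t - (s.length : Int) ≤ 0) :
    rpop (s ++ [m]) t x = ((rpop s t x).1 ++ [m], (rpop s t x).2) := by
  induction s generalizing t with
  | nil =>
    simp only [List.nil_append, rpop]
    rw [if_neg]
    rintro ⟨h1, h2⟩
    rcases hcond with h | h
    · omega
    · simp at h; omega
  | cons y ys ih =>
    simp only [List.cons_append, rpop]
    split_ifs with h
    · apply ih (t - 1) (by omega)
      rcases hcond with h' | h'
      · exact Or.inl h'
      · right
        simp only [List.length_cons] at h'
        push_cast at h' ⊢
        omega
    · rfl

-- phase (b): the window maximum at the bottom of the stack is never popped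
lemma runA_bottom (xs : List Int) : ∀ (s : List Int) (t m : Int), 0 ≤ t →
    (∀ (p : Nat) (hp : p < xs.length), xs[p] ≤ m ∨ t - (s.length : Int) - p ≤ 0) →
    runA (s ++ [m]) t xs = ((runA s t xs).1 ++ [m], (runA s t xs).2) := by
  induction xs with
  | nil => intro s t m _ _; simp [runA]
  | cons x xs ih =>
    intro s t m ht hcond
    simp only [runA, List.foldl_cons]
    rw [rpop_bottom s t x m ht (by
      have := hcond 0 (by simp)
      simpa using this)]
    have hlen := rpop_len s t x
    have hstep : (x :: ((rpop s t x).1 ++ [m])) = (x :: (rpop s t x).1) ++ [m] := by simp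
    rw [hstep]
    have := ih (x :: (rpop s t x).1) ((rpop s t x).2) m (rpop_nonneg s t x ht) (by
      intro p hp
      have h2 := hcond (p + 1) (by simpa using Nat.succ_lt_succ hp)
      rcases h2 with h2 | h2
      · left; simpa using h2
      · right
        simp only [List.length_cons]
        push_cast at h2 ⊢
        omega)
    simpa [runA] using this

lemma pvTrim_append (S : List Int) (tf m : Int) (h : tf.toNat ≤ S.length) :
    pvTrim (S ++ [m], tf) = m :: pvTrim (S, tf) := by
  unfold pvTrim
  split_ifs with h1
  · rw [List.drop_append_of_le_length h, List.reverse_append]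
    simp
  · rw [List.reverse_append]
    simp

-- A's run computes the greedy recursion
lemma A_eq_gms : ∀ (r : Nat) (nums : List Int), r ≤ nums.length →
    pvTrim (runA [] ((nums.length : Int) - r) nums) = gms nums r := by
  intro r
  induction r with
  | zero =>
    intro nums _
    simp only [Nat.cast_zero, sub_zero]
    have hlen := runA_len nums [] (nums.length : Int)
    have hnn := runA_nonneg nums [] (nums.length : Int) (by positivity)
    unfold pvTrim gms
    split_ifs with h
    · rw [List.drop_eq_nil_iff.mpr (by simp at hlen; omega)]
      simp
    · have h0 : (runA [] (nums.length : Int) nums).1.length = 0 := by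
        simp at hlen; omega
      rw [List.length_eq_zero_iff.mp h0]
      simp
  | succ r ih =>
    intro nums hr
    push_cast
    have hwlen : (nums.take (nums.length - r)).length = nums.length - r := by
      simp
    have hwne : nums.take (nums.length - r) ≠ [] := by
      intro h
      rw [h] at hwlen
      simp at hwlen
      omega
    obtain ⟨m, hm⟩ : ∃ m, PySem.List.max? (nums.take (nums.length - r)) (fun x => x) = some m := by
      obtain ⟨a, tl, hat⟩ := List.exists_cons_of_ne_nil hwne
      exact ⟨tl.foldl max a, by rw [hat]; exact PySem.List.max?_id_cons a tl⟩
    have hmmem : m ∈ nums.take (nums.length - r) := PySem.List.max?_mem hm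
    have hmax : ∀ y ∈ nums.take (nums.length - r), y ≤ m := by
      have := PySem.List.max?_isMax hm
      intro y hy
      exact this y hy
    obtain ⟨j, hj⟩ : ∃ j, PySem.List.index? (nums.take (nums.length - r)) m = some j := by
      have := PySem.List.index?_isSome_iff (nums.take (nums.length - r)) m
      exact Option.isSome_iff_exists.mp (this.mpr hmmem)
    obtain ⟨hjlt0, hwj, hjfirst⟩ := PySem.List.getElem_of_index?_eq_some hj
    have hjlt : j < nums.length - r := by rw [hwlen] at hjlt0; exact hjlt0
    have hjn : j < nums.length := by omega
    have hnumsj : nums[j] = m := by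
      have h1 : (nums.take (nums.length - r))[j]'hjlt0 = nums[j] := List.getElem_take
      rw [← h1, hwj]
    have hnums : nums = nums.take j ++ [m] ++ nums.drop (j + 1) := by
      rw [← hnumsj]
      rw [List.append_assoc, List.singleton_append, ← List.drop_eq_getElem_cons hjn]
      exact (List.take_append_drop j nums).symm
    have hpref : ∀ y ∈ nums.take j, y < m := by
      intro y hy
      obtain ⟨p, hp, rfl⟩ := List.mem_iff_getElem.mp hy
      have hpj : p < j := by simp at hp; omega
      have h1 : (nums.take j)[p]'hp = nums[p]'(by omega) := List.getElem_take
      have h2 : (nums.take (nums.length - r))[p]'(by rw [hwlen]; omega)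
          = nums[p]'(by omega) := List.getElem_take
      have hle := hmax _ (List.getElem_mem (by rw [hwlen]; omega : p < (nums.take (nums.length - r)).length))
      rw [h2] at hle
      have hne : nums[p]'(by omega) ≠ m := by
        intro he
        exact hjfirst p hpj (h2.trans he)
      rw [h1]
      exact lt_of_le_of_ne hle hne
    have hjtake : (nums.take j).length = j := by simp; omega
    have ha : runA [] ((nums.length : Int) - (↑r + 1)) (nums.take j ++ [m])
        = ([m], ((nums.length : Int) - (↑r + 1)) - j) := by
      have := runA_prefix (nums.take j) ((nums.length : Int) - (↑r + 1)) m hpref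
        (by rw [hjtake]; omega)
      rw [this, hjtake]
    have hb := runA_bottom (nums.drop (j + 1)) [] (((nums.length : Int) - (↑r + 1)) - j) m
      (by omega)
      (by
        intro p hp
        by_cases hpt : (p : Int) < ((nums.length : Int) - (↑r + 1)) - j
        · left
          have hplen : p < nums.length - (j + 1) := by simpa using hp
          have hidx : j + 1 + p < nums.length - r := by push_cast at hpt; omega
          have h1 : (nums.drop (j + 1))[p]'hp = nums[j + 1 + p]'(by omega) := List.getElem_drop
          have h2 : (nums.take (nums.length - r))[j + 1 + p]'(by rw [hwlen]; omega)
              = nums[j + 1 + p]'(by omega) := List.getElem_take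
          rw [h1, ← h2]
          exact hmax _ (List.getElem_mem _)
        · right; simp only [List.length_nil, Nat.cast_zero, sub_zero]; push_cast at hpt ⊢; omega)
    simp only [List.nil_append] at hb
    have key : runA [] ((nums.length : Int) - (↑r + 1)) nums
        = ((runA [] (((nums.length : Int) - (↑r + 1)) - j) (nums.drop (j + 1))).1 ++ [m],
           (runA [] (((nums.length : Int) - (↑r + 1)) - j) (nums.drop (j + 1))).2) := by
      suffices hgen : ∀ (zs : List Int), zs = nums.drop (j + 1) →
          runA [] ((nums.length : Int) - (↑r + 1)) (nums.take j ++ [m] ++ zs)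
            = ((runA [] (((nums.length : Int) - (↑r + 1)) - j) zs).1 ++ [m],
               (runA [] (((nums.length : Int) - (↑r + 1)) - j) zs).2) by
        have h := hgen (nums.drop (j + 1)) rfl
        rw [← hnums] at h
        exact h
      intro zs hzs
      have hbz := hb
      rw [← hzs] at hbz
      unfold runA at ha hbz ⊢
      rw [List.foldl_append, ha, hbz]
    have hzlen : (nums.drop (j + 1)).length = nums.length - (j + 1) := by simp
    have hlen2 := runA_len (nums.drop (j + 1)) [] (((nums.length : Int) - (↑r + 1)) - j)
    have hnn2 := runA_nonneg (nums.drop (j + 1)) [] (((nums.length : Int) - (↑r + 1)) - j)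
      (by omega)
    rw [key, pvTrim_append _ _ _ (by
      rw [hzlen] at hlen2
      simp at hlen2
      omega)]
    have hteq : ((nums.drop (j + 1)).length : Int) - r = ((nums.length : Int) - (↑r + 1)) - j := by
      rw [hzlen]; omega
    have hih := ih (nums.drop (j + 1)) (by omega)
    rw [hteq] at hih
    rw [hih]
    conv_rhs => rw [gms]
    simp only [hm, hj]

-- B's loop computes the greedy recursion
lemma B_loop (nums : List Int) (k : Int) : ∀ (r : Nat) (start : Int) (res : List Int),
    0 ≤ start → start + r ≤ (nums.length : Int) →
    ((PySem.List.pyRange (k - r) k 1).foldl (pvStepB nums k) (res, start)).1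
      = res ++ gms (nums.drop start.toNat) r := by
  intro r
  induction r with
  | zero =>
    intro start res h0 hle
    rw [show k - ((0 : Nat) : Int) = k from by push_cast; ring]
    rw [PySem.List.pyRange_one_eq_nil le_rfl]
    simp [gms]
  | succ r ih =>
    intro start res h0 hle
    have hstartn : start.toNat + r + 1 ≤ nums.length := by omega
    rw [PySem.List.pyRange_one_cons (by push_cast; omega)]
    rw [List.foldl_cons]
    have hnext : k - ((r + 1 : Nat) : Int) + 1 = k - r := by push_cast; ring
    rw [hnext]
    have hbound : (nums.length : Int) - k + (k - ((r + 1 : Nat) : Int)) + 1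
        = (nums.length : Int) - r := by push_cast; ring
    have hwin : PySem.List.slice nums (some start) (some ((nums.length : Int) - r))
        = (nums.drop start.toNat).take ((nums.drop start.toNat).length - r) := by
      rw [PySem.List.slice_toNat nums h0 (by omega)]
      congr 1
      simp
      omega
    have hwlen : ((nums.drop start.toNat).take ((nums.drop start.toNat).length - r)).length
        = (nums.drop start.toNat).length - r := by simp
    have hwne : (nums.drop start.toNat).take ((nums.drop start.toNat).length - r) ≠ [] := by
      intro h
      rw [h] at hwlen
      simp at hwlen
      omega
    obtain ⟨m, hm⟩ : ∃ m, PySem.List.max? ((nums.drop start.toNat).take ((nums.drop start.toNat).length - r)) (fun x => x) = some m := by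
      obtain ⟨a, tl, hat⟩ := List.exists_cons_of_ne_nil hwne
      exact ⟨tl.foldl max a, by rw [hat]; exact PySem.List.max?_id_cons a tl⟩
    have hmmem : m ∈ (nums.drop start.toNat).take ((nums.drop start.toNat).length - r) := PySem.List.max?_mem hm
    obtain ⟨j, hj⟩ : ∃ j, PySem.List.index? ((nums.drop start.toNat).take ((nums.drop start.toNat).length - r)) m = some j := by
      have := PySem.List.index?_isSome_iff ((nums.drop start.toNat).take ((nums.drop start.toNat).length - r)) m
      exact Option.isSome_iff_exists.mp (this.mpr hmmem)
    obtain ⟨hjlt, -, -⟩ := PySem.List.getElem_of_index?_eq_some hj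
    rw [hwlen] at hjlt
    have hstep : pvStepB nums k (res, start) (k - ((r + 1 : Nat) : Int))
        = (res ++ [m], start + (j : Int) + 1) := by
      unfold pvStepB
      simp only [hbound, hwin, hm, hj]
    rw [hstep]
    have hjd : start.toNat + (j + 1) + r ≤ nums.length := by
      have := hjlt
      simp only [List.length_drop] at this
      omega
    have hnext2 := ih (start + (j : Int) + 1) (res ++ [m]) (by omega) (by omega)
    rw [hnext2]
    have hdrop : nums.drop (start + (j : Int) + 1).toNat = (nums.drop start.toNat).drop (j + 1) := by
      rw [List.drop_drop]
      congr 1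
      omega
    rw [hdrop]
    conv_rhs => rw [gms]
    simp only [hm, hj]
    simp

-- ===== VERDICT (by name: the statement is the Claim_ definition above) =====
theorem get_max_sequence_spec : Claim_equal_get_max_sequence := by
  unfold Claim_equal_get_max_sequence
  intro nums k _ hpre
  unfold Pre_get_max_sequence at hpre
  unfold Spec_get_max_sequence
  rw [get_max_sequence_char]
  unfold get_max_sequence_alt
  by_cases hk : k ≤ 0
  · rw [PySem.List.pyRange_one_eq_nil hk]
    simp only [List.foldl_nil]
    have hlen := runA_len nums [] ((nums.length : Int) - k)
    have hnn := runA_nonneg nums [] ((nums.length : Int) - k) (by omega)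
    unfold pvTrim
    split_ifs with h
    · rw [List.drop_eq_nil_iff.mpr (by simp at hlen; omega)]
      simp
    · have h0 : (runA [] ((nums.length : Int) - k) nums).1.length = 0 := by
        simp at hlen; omega
      rw [List.length_eq_zero_iff.mp h0]
      simp
  · have hk2 : 0 < k := by omega
    have hB := B_loop nums k k.toNat 0 [] le_rfl (by omega)
    rw [show k - ((k.toNat : Nat) : Int) = 0 from by omega] at hB
    rw [hB]
    rw [show (nums.length : Int) - k = (nums.length : Int) - ((k.toNat : Nat) : Int) from by omega]
    rw [A_eq_gms k.toNat nums (by omega)]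
    simp
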